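-- pv_equiv track=rewrite | github.com/smowton/scan | sim/params.py | core_tier
-- ===== SOURCE A (Python) =====
-- core_cost_tiers = [{"cores": 100, "cost": 5}, {"cores": None, "cost": 25}]
--
-- def core_tier(cores):
--
--     for i, tier in enumerate(core_cost_tiers):
--         if tier["cores"] is None:
--             return i
--         cores -= tier["cores"]
--         if cores <= 0:
--             return i
--
--     raise Exception("Bad core_cost_tiers")
-- ===== SOURCE B (Python) =====
-- def core_tier(cores):
--     # Closed form: the only finite tier holds 100 cores; everything beyond is tier 1.
--     return 0 if cores <= 100 else 1
-- ===== Notes on version B (the rewrite author's own statement) =====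
-- stated objective: simpler
-- what changed: Replaced the enumerate loop over core_cost_tiers (with cumulative subtraction and an unreachable raise) by a single closed-form boundary test 'cores <= 100'.
import Mathlib
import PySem

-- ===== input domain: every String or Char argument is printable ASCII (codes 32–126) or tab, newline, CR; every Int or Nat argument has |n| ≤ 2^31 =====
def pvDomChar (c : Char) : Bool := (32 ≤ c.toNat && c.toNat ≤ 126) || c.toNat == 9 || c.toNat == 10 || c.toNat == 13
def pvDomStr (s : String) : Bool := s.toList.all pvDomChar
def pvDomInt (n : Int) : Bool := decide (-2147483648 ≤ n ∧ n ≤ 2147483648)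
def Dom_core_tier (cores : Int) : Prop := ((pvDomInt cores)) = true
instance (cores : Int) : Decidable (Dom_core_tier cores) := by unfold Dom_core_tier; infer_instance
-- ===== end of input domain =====

-- B replaces A's loop over the tier list with one closed-form boundary test; equal return value everywhere.

-- ===== PORT A =====
-- module constant: list of tiers, each (cores : Option Int, cost : Int)
def coreCostTiers : List (Option Int × Int) := [(some 100, 5), (none, 25)]

-- the for-loop over enumerate(core_cost_tiers): early return = some i; falling off = none (Python raises there, unreachable for the fixed list)
def coreTierLoop (cores : Int) (i : Int) : List (Option Int × Int) → Option Int
  | [] => none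
  | tier :: rest =>
    match tier.1 with
    | none => some i
    | some c =>
      let cores' := cores - c
      if cores' ≤ 0 then some i else coreTierLoop cores' (i + 1) rest

def core_tier (cores : Int) : Int :=
  match coreTierLoop cores 0 coreCostTiers with
  | some i => i
  | none => 0   -- Python raises here; unreachable since the last tier has cores = None

-- ===== PORT B =====
def core_tier_alt (cores : Int) : Int :=
  if cores ≤ 100 then 0 else 1

-- ===== PRECONDITION & SPEC =====
def Spec_core_tier (cores : Int) (out : Int) : Prop := out = core_tier_alt cores
instance (cores : Int) (out : Int) : Decidable (Spec_core_tier cores out) := by unfold Spec_core_tier; infer_instance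

-- ===== CLAIM (what is proved, stated in full; the proofs are below) =====
def Claim_equal_core_tier : Prop := ∀ (cores : Int), Dom_core_tier cores → Spec_core_tier cores (core_tier cores)

-- ===== LEMMAS AND PROOFS =====

-- ===== VERDICT (by name: the statement is the Claim_ definition above) =====
theorem core_tier_spec : Claim_equal_core_tier := by
  intro cores _
  show core_tier cores = core_tier_alt cores
  simp only [core_tier, core_tier_alt, coreCostTiers, coreTierLoop]
  split_ifs with h h2 h2 <;> simp <;> omega
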